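-- pv_equiv track=rewrite | github.com/konap/Crypto2 | TestAttack.py | decode_val
-- ===== SOURCE A (Python) =====
-- def form_dict():
--     d = {0: 'а', 1: 'б', 2: 'в', 3: 'г', 4: 'д', 5: 'е', 6: 'ж', 7: 'з', 8: 'и', 9: 'й',
--          10: 'к', 11: 'л', 12: 'м', 13: 'н', 14: 'о', 15: 'п', 16: 'р', 17: 'с',
--          18: 'т', 19: 'у', 20: 'ф', 21: 'х', 22: 'ц', 23: 'ч', 24: 'ш', 25: 'щ',
--          26: 'ъ', 27: 'ы', 28: 'ь', 29: 'э', 30: 'ю', 31: "я"}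
--     return d
--
-- def decode_val(list_in):
--     list_code = []
--     lent = len(list_in)
--
--     d = form_dict()  # получаем словарь кода
--
--     for i in range(lent):
--         for value in d:
--             if list_in[i] == value:
--                 list_code.append(d[value])
--     return list_code
-- ===== SOURCE B (Python) =====
-- def decode_val(list_in):
--     # No lookup table: Cyrillic а..я are contiguous from ord('а'); map directly, skip out-of-range values.
--     return [chr(ord('а') + v) for v in list_in if 0 <= v < 32]
-- ===== Notes on version B (the rewrite author's own statement) =====
-- stated objective: simpler
-- what changed: Replaced the 32-entry dict built per call and the inner scan over all its keys by a single comprehension computing chr(ord('а')+v) for in-range values.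
import Mathlib
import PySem

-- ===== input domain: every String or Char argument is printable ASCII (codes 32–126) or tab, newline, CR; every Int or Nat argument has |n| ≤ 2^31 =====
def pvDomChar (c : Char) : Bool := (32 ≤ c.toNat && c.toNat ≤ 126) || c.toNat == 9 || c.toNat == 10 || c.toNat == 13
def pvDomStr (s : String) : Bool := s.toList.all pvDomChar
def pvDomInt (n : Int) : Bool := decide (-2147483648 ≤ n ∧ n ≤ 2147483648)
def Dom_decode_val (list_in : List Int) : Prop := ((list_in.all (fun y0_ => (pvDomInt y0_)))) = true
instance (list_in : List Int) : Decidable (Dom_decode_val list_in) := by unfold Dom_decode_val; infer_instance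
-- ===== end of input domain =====

-- B replaces A's per-call 32-entry dict and inner key scan by a direct per-element
-- closed-form character computation (simpler, one pass).

-- ===== PORT A =====
def form_dict : PySem.Dict Int String :=
  PySem.Dict.ofList [(0, "а"), (1, "б"), (2, "в"), (3, "г"), (4, "д"), (5, "е"), (6, "ж"),
    (7, "з"), (8, "и"), (9, "й"), (10, "к"), (11, "л"), (12, "м"), (13, "н"), (14, "о"),
    (15, "п"), (16, "р"), (17, "с"), (18, "т"), (19, "у"), (20, "ф"), (21, "х"), (22, "ц"),
    (23, "ч"), (24, "ш"), (25, "щ"), (26, "ъ"), (27, "ы"), (28, "ь"), (29, "э"), (30, "ю"),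
    (31, "я")]

-- list_in[i] is ported as pyGetD (default never used: i ranges over the valid indices);
-- d[value] as getD (value is always a key).
def decode_val (list_in : List Int) : List String :=
  (PySem.List.pyRange 0 (PySem.List.len list_in) 1).foldl (fun list_code i =>
    form_dict.keys.foldl (fun acc value =>
      if PySem.List.pyGetD list_in i 0 == value then acc ++ [form_dict.getD value ""] else acc)
      list_code) []

-- ===== PORT B =====
def decode_val_alt (list_in : List Int) : List String :=
  list_in.filterMap (fun v =>
    if 0 ≤ v ∧ v < 32 then some (String.mk [Char.ofNat (1072 + v.toNat)]) else none)

-- ===== PRECONDITION & SPEC =====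
def Spec_decode_val (list_in : List Int) (out : List String) : Prop := out = decode_val_alt list_in
instance (list_in : List Int) (out : List String) : Decidable (Spec_decode_val list_in out) := by unfold Spec_decode_val; infer_instance

-- ===== CLAIM (what is proved, stated in full; the proofs are below) =====
def Claim_equal_decode_val : Prop := ∀ (list_in : List Int), Dom_decode_val list_in → Spec_decode_val list_in (decode_val list_in)

-- ===== LEMMAS AND PROOFS =====

theorem flatMap_eq_filterMap (l : List Int) :
    l.flatMap (fun x => if 0 ≤ x ∧ x < 32 then [String.mk [Char.ofNat (1072 + x.toNat)]] else [])
    = l.filterMap (fun v => if 0 ≤ v ∧ v < 32 then some (String.mk [Char.ofNat (1072 + v.toNat)]) else none) := by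
  induction l with
  | nil => rfl
  | cons y t ih =>
    simp only [List.flatMap_cons, List.filterMap_cons]
    by_cases hy : 0 ≤ y ∧ y < 32 <;> simp [hy, ih]

-- The inner scan over the dict keys yields exactly B's per-element value.
theorem inner_scan_eq (x : Int) (acc : List String) :
    form_dict.keys.foldl (fun acc value =>
      if x == value then acc ++ [form_dict.getD value ""] else acc) acc
    = acc ++ (if 0 ≤ x ∧ x < 32 then [String.mk [Char.ofNat (1072 + x.toNat)]] else []) := by
  rw [PySem.List.foldl_append_if (p := fun value => x == value)
      (f := fun value => form_dict.getD value "")]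
  by_cases h : 0 ≤ x ∧ x < 32
  · obtain ⟨h1, h2⟩ := h
    interval_cases x <;> rfl
  · simp only [if_neg h]
    have hfil : form_dict.keys.filter (fun value => x == value) = [] := by
      apply List.filter_eq_nil_iff.mpr
      intro v hv
      have hv' : (0:Int) ≤ v ∧ v < 32 := by
        have hall : ∀ w ∈ form_dict.keys, (0:Int) ≤ w ∧ w < 32 := by decide
        exact hall v hv
      simp only [beq_iff_eq]
      omega
    simp [hfil]

theorem decode_val_eq (list_in : List Int) :
    decode_val list_in = decode_val_alt list_in := by
  unfold decode_val
  rw [PySem.List.foldl_pyRange_zero_pyGetD list_in 0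
      (fun acc x => form_dict.keys.foldl (fun a value =>
        if x == value then a ++ [form_dict.getD value ""] else a) acc) []]
  have : list_in.foldl (fun acc x => form_dict.keys.foldl (fun a value =>
      if x == value then a ++ [form_dict.getD value ""] else a) acc) []
      = list_in.foldl (fun acc x => acc ++
        (if 0 ≤ x ∧ x < 32 then [String.mk [Char.ofNat (1072 + x.toNat)]] else [])) [] := by
    apply PySem.List.foldl_congr_mem
    intro acc x _
    exact inner_scan_eq x acc
  rw [this, PySem.List.foldl_append_eq_flatMap]
  unfold decode_val_alt
  simp only [List.nil_append]
  exact flatMap_eq_filterMap list_in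

-- ===== VERDICT (by name: the statement is the Claim_ definition above) =====
theorem decode_val_spec : Claim_equal_decode_val := by
  intro l _
  exact decode_val_eq l
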